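-- pv_equiv track=rewrite | github.com/Olixpin/Altschool-LeetCode-Algorithm | Tope/Day7/subsetsII.py | convert
-- ===== SOURCE A (Python) =====
-- def convert(i, nums):
--     k = i
--     index = 0
--     res = []
--     while k > 0:
--         if (k & 1) == 1:
--             res.append(nums[index])
--
--         k >>= 1
--         index += 1
--     return res
-- ===== SOURCE B (Python) =====
-- def convert(i, nums):
--     res = []
--     k = i
--     while k > 0:
--         low = k & -k
--         res.append(nums[low.bit_length() - 1])
--         k &= k - 1
--     return res
-- ===== Notes on version B (the rewrite author's own statement) =====
-- stated objective: alternative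
-- what changed: B loops only over the set bits of i, isolating each lowest set bit with k & -k and indexing nums via bit_length, instead of A's bit-by-bit shift that tests every position.
import Mathlib
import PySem

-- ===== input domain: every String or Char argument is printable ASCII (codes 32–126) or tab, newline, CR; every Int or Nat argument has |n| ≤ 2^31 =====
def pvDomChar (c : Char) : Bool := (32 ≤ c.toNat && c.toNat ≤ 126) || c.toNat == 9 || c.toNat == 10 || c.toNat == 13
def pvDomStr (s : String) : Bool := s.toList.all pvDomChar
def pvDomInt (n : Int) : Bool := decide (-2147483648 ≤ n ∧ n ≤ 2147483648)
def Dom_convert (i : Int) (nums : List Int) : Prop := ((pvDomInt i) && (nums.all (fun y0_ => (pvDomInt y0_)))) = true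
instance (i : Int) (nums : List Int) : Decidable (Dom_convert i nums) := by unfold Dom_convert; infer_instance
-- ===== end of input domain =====

-- B iterates only over the set bits of i (k &= k-1) instead of over every bit position; alternative decomposition, same result.

-- termination helper for port A's loop (cited by name in decreasing_by)
theorem pv_shift_lt (k : Int) (h : 0 < k) : (k >>> (1 : Nat)).toNat < k.toNat := by
  cases k with
  | ofNat m =>
      have hm : 0 < m := Int.natCast_pos.mp h
      show (Int.ofNat (m >>> 1)).toNat < (Int.ofNat m).toNat
      simp [Nat.shiftRight_one]
      omega
  | negSucc n => exact absurd h (by omega)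

-- ===== PORT A =====
-- literal port of A's while-loop: test bit 0, shift right, advance index
def convertLoopA (nums : List Int) (k : Int) (index : Int) (res : List Int) : List Int :=
  if h : 0 < k then
    let res' := if PySem.Int.band k 1 = 1
                then res ++ [(PySem.List.pyGet? nums index).getD 0]  -- nums[index]; Pre_ keeps it in range
                else res
    convertLoopA nums (k >>> (1 : Nat)) (index + 1) res'
  else res
termination_by k.toNat
decreasing_by exact pv_shift_lt k h

def convert (i : Int) (nums : List Int) : List Int :=
  convertLoopA nums i 0 []

-- termination helper for port B's loop (cited by name in decreasing_by)
theorem pv_clear_lt (k : Int) (h : 0 < k) : (PySem.Int.band k (k - 1)).toNat < k.toNat := by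
  have h0 : (0:Int) ≤ k := le_of_lt h
  have h1 : (0:Int) ≤ k - 1 := by omega
  have h2 : (k - 1).toNat = k.toNat - 1 := by omega
  simp [PySem.Int.band, h0, h2]
  have := Nat.and_le_right (n := k.toNat) (m := k.toNat - 1)
  omega

-- ===== PORT B =====
-- literal port of Source B: peel the lowest set bit (k & -k), index = bit_length - 1, clear it with k &= k-1
def convertLoopB (nums : List Int) (k : Int) (res : List Int) : List Int :=
  if h : 0 < k then
    let low := PySem.Int.band k (-k)
    let res' := res ++ [(PySem.List.pyGet? nums ((PySem.Int.bitLength low : Int) - 1)).getD 0]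
    convertLoopB nums (PySem.Int.band k (k - 1)) res'
  else res
termination_by k.toNat
decreasing_by exact pv_clear_lt k h

def convert_alt (i : Int) (nums : List Int) : List Int :=
  convertLoopB nums i []

-- ===== PRECONDITION & SPEC =====
-- Pre_ excludes exactly the inputs where A raises IndexError (a set bit of i at position ≥ len(nums)); A returns on every input admitted.
def Pre_convert (i : Int) (nums : List Int) : Prop := i < 2 ^ nums.length
instance (i : Int) (nums : List Int) : Decidable (Pre_convert i nums) := by unfold Pre_convert; infer_instance
def pvWitness_convert : Int × List Int := (5, [1, 2, 3])

def Spec_convert (i : Int) (nums : List Int) (out : List Int) : Prop := out = convert_alt i nums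
instance (i : Int) (nums : List Int) (out : List Int) : Decidable (Spec_convert i nums out) := by unfold Spec_convert; infer_instance

-- ===== CLAIM (what is proved, stated in full; the proofs are below) =====
def Claim_equal_convert : Prop := ∀ (i : Int) (nums : List Int), Dom_convert i nums → Pre_convert i nums → Spec_convert i nums (convert i nums)

-- ===== LEMMAS AND PROOFS =====

-- reference list: element nums[index + p] for each set-bit position p of m, low bits first
def bitsSpec (nums : List Int) (m : Nat) (index : Int) : List Int :=
  if m = 0 then []
  else (if m % 2 = 1 then [(PySem.List.pyGet? nums index).getD 0] else []) ++ bitsSpec nums (m / 2) (index + 1)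
termination_by m
decreasing_by exact Nat.div_lt_self (by omega) (by omega)

theorem land_odd (j : Nat) : (2 * j + 1) &&& (2 * j) = 2 * j := by
  apply Nat.eq_of_testBit_eq
  intro i
  cases i with
  | zero => simp [Nat.testBit_zero, Nat.mul_mod_right]
  | succ i =>
      have h1 : (2 * j + 1) / 2 = j := by omega
      have h2 : (2 * j) / 2 = j := by omega
      rw [Nat.testBit_land]
      simp [Nat.testBit_succ, h1, h2]

theorem land_even (n : Nat) (h : 0 < n) : (2 * n) &&& (2 * n - 1) = 2 * (n &&& (n - 1)) := by
  apply Nat.eq_of_testBit_eq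
  intro i
  cases i with
  | zero =>
      have h1 : (2 * n) % 2 = 0 := by omega
      have h2 : (2 * (n &&& (n - 1))) % 2 = 0 := by omega
      simp [Nat.testBit_zero, h1, h2]
  | succ i =>
      have h1 : (2 * n) / 2 = n := by omega
      have h2 : (2 * n - 1) / 2 = n - 1 := by omega
      have h3 : (2 * (n &&& (n - 1))) / 2 = n &&& (n - 1) := by omega
      rw [Nat.testBit_land]
      simp [Nat.testBit_succ, h1, h2, h3]

-- lowest set bit as a Nat, exactly what PySem.Int.band k (-k) computes for k = ↑m > 0
def lowbit (m : Nat) : Nat := m - (m &&& (m - 1))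

theorem band_neg_eq (m : Nat) (h : 0 < m) :
    PySem.Int.band (m : Int) (-(m : Int)) = ((lowbit m : Nat) : Int) := by
  have h1 : (0:Int) ≤ (m : Int) := by positivity
  have h2 : ¬ (0:Int) ≤ -(m : Int) := by omega
  simp [PySem.Int.band, h1, lowbit]
  intro h0
  omega

theorem lowbit_odd (j : Nat) : lowbit (2 * j + 1) = 1 := by
  unfold lowbit
  rw [show 2 * j + 1 - 1 = 2 * j by omega, land_odd]
  omega

theorem lowbit_even (n : Nat) (h : 0 < n) : lowbit (2 * n) = 2 * lowbit n := by
  unfold lowbit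
  rw [land_even n h]
  have := Nat.and_le_right (n := n) (m := n - 1)
  omega

theorem lowbit_pos (m : Nat) (h : 0 < m) : 0 < lowbit m := by
  induction m using Nat.strong_induction_on with
  | _ m IH =>
    rcases Nat.even_or_odd m with ⟨n, hn⟩ | ⟨j, hj⟩
    · have hn' : m = 2 * n := by omega
      have hnpos : 0 < n := by omega
      rw [hn', lowbit_even n hnpos]
      have := IH n (by omega) hnpos
      omega
    · rw [hj, lowbit_odd]; omega

theorem blen_natCast (x : Nat) (h : 0 < x) :
    PySem.Int.bitLength (x : Int) = PySem.Int.bitLength ((x / 2 : Nat) : Int) + 1 :=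
  PySem.Int.bitLength_natCast h

theorem blen_one : PySem.Int.bitLength ((1 : Nat) : Int) = 1 := by decide

theorem blen_double (x : Nat) (h : 0 < x) :
    PySem.Int.bitLength ((2 * x : Nat) : Int) = PySem.Int.bitLength ((x : Nat) : Int) + 1 := by
  rw [blen_natCast (2 * x) (by omega), show (2 * x) / 2 = x by omega]

theorem blen_pos (x : Nat) (h : 0 < x) : 0 < PySem.Int.bitLength (x : Int) := by
  rw [blen_natCast x h]; omega

-- bitsSpec on a doubled argument just shifts the index
theorem bitsSpec_double (nums : List Int) (n : Nat) (index : Int) :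
    bitsSpec nums (2 * n) index = bitsSpec nums n (index + 1) := by
  rcases Nat.eq_zero_or_pos n with h | h
  · subst h; rw [bitsSpec, bitsSpec]; simp
  · rw [bitsSpec]
    have h1 : ¬ (2 * n = 0) := by omega
    have h2 : ¬ ((2 * n) % 2 = 1) := by omega
    have h3 : (2 * n) / 2 = n := by omega
    simp [h1, h3]

-- peeling the lowest set bit out of bitsSpec, with the index B computes
theorem bitsSpec_peel (nums : List Int) (m : Nat) (index : Int) (h : 0 < m) :
    bitsSpec nums m index =
      (PySem.List.pyGet? nums (index + ((PySem.Int.bitLength (lowbit m : Int) - 1 : Nat) : Int))).getD 0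
        :: bitsSpec nums (m &&& (m - 1)) index := by
  induction m using Nat.strong_induction_on generalizing index with
  | _ m IH =>
    rcases Nat.even_or_odd m with ⟨n, hn⟩ | ⟨j, hj⟩
    · -- even: m = 2n, n > 0
      have hn' : m = 2 * n := by omega
      have hnpos : 0 < n := by omega
      subst hn'
      rw [bitsSpec_double, IH n (by omega) (index + 1) hnpos]
      rw [land_even n hnpos, bitsSpec_double]
      have harg : index + 1 + ((PySem.Int.bitLength ((lowbit n : Nat) : Int) - 1 : Nat) : Int)
          = index + ((PySem.Int.bitLength ((lowbit (2 * n) : Nat) : Int) - 1 : Nat) : Int) := by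
        rw [lowbit_even n hnpos, blen_double (lowbit n) (lowbit_pos n hnpos)]
        have hb := blen_pos (lowbit n) (lowbit_pos n hnpos)
        omega
      rw [harg]
    · -- odd: m = 2j+1
      subst hj
      rw [lowbit_odd, blen_one]
      rw [bitsSpec]
      have h1 : ¬ (2 * j + 1 = 0) := by omega
      have h2 : (2 * j + 1) % 2 = 1 := by omega
      have h3 : (2 * j + 1) / 2 = j := by omega
      simp only [h1, if_false, h2, h3]
      rw [show 2 * j + 1 - 1 = 2 * j by omega, land_odd, bitsSpec_double]
      simp

-- characterization of A's loop
theorem convertLoopA_char (nums : List Int) (m : Nat) (index : Int) (res : List Int) :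
    convertLoopA nums (m : Int) index res = res ++ bitsSpec nums m index := by
  induction m using Nat.strong_induction_on generalizing index res with
  | _ m IH =>
    rcases Nat.eq_zero_or_pos m with h | h
    · subst h
      rw [convertLoopA, bitsSpec]
      simp
    · rw [convertLoopA]
      have hk : (0:Int) < (m : Int) := by exact_mod_cast h
      rw [dif_pos hk]
      have hband : PySem.Int.band (m : Int) 1 = ((m &&& 1 : Nat) : Int) := by
        simp [PySem.Int.band]
      have hshift : ((m : Int) >>> (1 : Nat)) = ((m / 2 : Nat) : Int) := by
        show Int.ofNat (m >>> 1) = _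
        simp [Nat.shiftRight_one]
      rw [hband, hshift, IH (m / 2) (Nat.div_lt_self h (by omega))]
      conv_rhs => rw [bitsSpec]
      rw [if_neg (by omega : ¬ m = 0), Nat.and_one_is_mod]
      rcases Nat.eq_zero_or_pos (m % 2) with hp | hp
      · rw [if_neg (by omega : ¬ ((m % 2 : Nat) : Int) = 1), if_neg (by omega : ¬ m % 2 = 1)]
        simp
      · rw [if_pos (by omega : ((m % 2 : Nat) : Int) = 1), if_pos (by omega : m % 2 = 1)]
        simp

-- characterization of B's loop
theorem convertLoopB_char (nums : List Int) (m : Nat) (res : List Int) :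
    convertLoopB nums (m : Int) res = res ++ bitsSpec nums m 0 := by
  induction m using Nat.strong_induction_on generalizing res with
  | _ m IH =>
    rcases Nat.eq_zero_or_pos m with h | h
    · subst h
      rw [convertLoopB, bitsSpec]
      simp
    · rw [convertLoopB]
      have hk : (0:Int) < (m : Int) := by exact_mod_cast h
      rw [dif_pos hk]
      have hclear : PySem.Int.band (m : Int) ((m : Int) - 1) = ((m &&& (m - 1) : Nat) : Int) := by
        have h1 : (0:Int) ≤ (m : Int) := by positivity
        have h2 : (0:Int) ≤ (m : Int) - 1 := by omega
        simp [PySem.Int.band, h1]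
        omega
      have hlt : m &&& (m - 1) < m := by
        have := Nat.and_le_right (n := m) (m := m - 1)
        omega
      rw [band_neg_eq m h, hclear, IH (m &&& (m - 1)) hlt]
      rw [bitsSpec_peel nums m 0 h]
      have hb := blen_pos (lowbit m) (lowbit_pos m h)
      have hidx : ((PySem.Int.bitLength ((lowbit m : Nat) : Int) : Nat) : Int) - 1
          = (0 : Int) + ((PySem.Int.bitLength (lowbit m : Int) - 1 : Nat) : Int) := by
        push_cast [Nat.cast_sub hb]
        omega
      rw [hidx]
      simp

-- ===== VERDICT (by name: the statement is the Claim_ definition above) =====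
theorem convert_spec : Claim_equal_convert := by
  intro i nums _ _
  unfold Spec_convert convert convert_alt
  cases i with
  | ofNat m =>
      rw [show (Int.ofNat m) = (m : Int) from rfl, convertLoopA_char, convertLoopB_char]
  | negSucc n =>
      have h : ¬ (0:Int) < Int.negSucc n := by
        have := Int.negSucc_lt_zero n
        omega
      rw [convertLoopA, convertLoopB, dif_neg h, dif_neg h]
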